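-- pv_equiv track=rewrite | github.com/madal63-debug/SplKnetx2 | ide/compile_send.py | _strip_st_comments
-- ===== SOURCE A (Python) =====
-- def _strip_st_comments(text: str) -> str:
--     out: list[str] = []
--     i = 0
--     n = len(text)
--     in_block = False
--
--     while i < n:
--         if in_block:
--             if text.startswith("*)", i):
--                 in_block = False
--                 i += 2
--             else:
--                 i += 1
--             continue
--
--         if text.startswith("(*", i):
--             in_block = True
--             i += 2
--             continue
--
--         if text.startswith("//", i):
--             while i < n and text[i] not in "\r\n":
--                 i += 1
--             continue
--
--         out.append(text[i])
--         i += 1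
--
--     return "".join(out)
-- ===== SOURCE B (Python) =====
-- def _strip_st_comments(text: str) -> str:
--     out: list[str] = []
--     while True:
--         b = text.find("(*")
--         l = text.find("//")
--         if b == -1 and l == -1:
--             out.append(text)
--             break
--         if l == -1 or (b != -1 and b < l):
--             out.append(text[:b])
--             rest = text[b + 2:]
--             e = rest.find("*)")
--             if e == -1:
--                 break
--             text = rest[e + 2:]
--         else:
--             out.append(text[:l])
--             rest = text[l + 2:]
--             r = rest.find("\r")
--             nl = rest.find("\n")
--             j = nl if r == -1 else (r if nl == -1 else min(r, nl))
--             if j == -1: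
--                 break
--             text = rest[j:]
--     return "".join(out)
-- ===== Notes on version B (the rewrite author's own statement) =====
-- stated objective: faster
-- what changed: Replaced the per-character state-machine loop (in_block flag, index stepping, char-by-char append) with repeated str.find jumps: B locates the next '(*' or '//' delimiter, copies the comment-free chunk whole, and slices past the matching '*)' or end-of-line.
import Mathlib
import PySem

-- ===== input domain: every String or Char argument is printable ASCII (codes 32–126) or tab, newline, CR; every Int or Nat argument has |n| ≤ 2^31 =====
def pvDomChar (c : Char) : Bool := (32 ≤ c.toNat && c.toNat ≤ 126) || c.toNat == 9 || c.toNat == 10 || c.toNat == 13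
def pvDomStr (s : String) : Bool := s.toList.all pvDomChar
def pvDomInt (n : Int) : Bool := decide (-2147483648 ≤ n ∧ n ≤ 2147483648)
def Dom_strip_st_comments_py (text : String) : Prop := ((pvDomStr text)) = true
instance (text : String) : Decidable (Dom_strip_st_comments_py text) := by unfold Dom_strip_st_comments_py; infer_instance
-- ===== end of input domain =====

-- B replaces A's per-character state machine by repeated `str.find` jumps to the
-- next comment delimiter, copying comment-free chunks whole (objective: faster by
-- a constant factor — the hot scanning loop moves into `find`).

-- ===== PORT A =====
-- `text[i] not in "\r\n"` as a predicate on one char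
def pvNotNL (c : Char) : Bool := !(c == '\r' || c == '\n')

-- A's while-loop: the suffix `text[i:]` is the list argument, `in_block` the flag;
-- `out.append`/join becomes consing onto the recursive result.
def pvGoA (inb : Bool) (cs : List Char) : List Char :=
  match cs with
  | [] => []
  | c :: rest =>
    if inb then
      if h1 : PySem.Chars.startswith (c :: rest) ['*', ')'] then pvGoA false rest.tail
      else pvGoA true rest
    else if h2 : PySem.Chars.startswith (c :: rest) ['(', '*'] then pvGoA true rest.tail
    else if h3 : PySem.Chars.startswith (c :: rest) ['/', '/'] then
      -- the inner `while i < n and text[i] not in "\r\n": i += 1`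
      pvGoA false (List.dropWhile pvNotNL (c :: rest))
    else c :: pvGoA false rest
termination_by cs.length
decreasing_by
  · cases rest <;> simp <;> omega
  · simp
  · cases rest <;> simp <;> omega
  · have hc : pvNotNL c = true := by
      simp only [PySem.Chars.startswith] at h3
      cases rest with
      | nil => simp [List.isPrefixOf] at h3
      | cons d t =>
        simp only [List.isPrefixOf, Bool.and_eq_true, beq_iff_eq] at h3
        rw [← h3.1]; decide
    have heq : List.dropWhile pvNotNL (c :: rest) = List.dropWhile pvNotNL rest := by
      simp [List.dropWhile, hc]
    rw [heq]
    have := List.length_dropWhile_le pvNotNL rest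
    simp only [List.length_cons]
    omega
  · simp

def strip_st_comments_py (text : String) : String := String.ofList (pvGoA false text.toList)

-- ===== PORT B =====
-- `j = nl if r == -1 else (r if nl == -1 else min(r, nl))`
def pvMinIdx (r nl : Int) : Int := if r = -1 then nl else if nl = -1 then r else min r nl

-- termination helper for pvGoB, cited by name in decreasing_by
lemma pvGoBDec (cs : List Char) (hne : cs ≠ []) (a b : Nat) :
    ((cs.drop (a + 2)).drop b).length < cs.length := by
  cases cs with
  | nil => exact absurd rfl hne
  | cons x xs =>
    simp only [List.drop_drop, List.length_drop, List.length_cons]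
    omega

lemma pvFindNeNil (cs : List Char)
    (h : ¬ (PySem.Chars.find cs ['(', '*'] = -1 ∧ PySem.Chars.find cs ['/', '/'] = -1)) :
    cs ≠ [] := by
  rintro rfl
  exact h ⟨rfl, rfl⟩

-- B's while-loop: `text` shrinks by slicing past each stripped comment.
def pvGoB (cs : List Char) : List Char :=
  let b := PySem.Chars.find cs ['(', '*']
  let l := PySem.Chars.find cs ['/', '/']
  if h0 : b = -1 ∧ l = -1 then cs
  else if l = -1 ∨ (¬ b = -1 ∧ b < l) then
    let rest := cs.drop (b.toNat + 2)
    let e := PySem.Chars.find rest ['*', ')']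
    if e = -1 then cs.take b.toNat
    else cs.take b.toNat ++ pvGoB (rest.drop (e.toNat + 2))
  else
    let rest := cs.drop (l.toNat + 2)
    let j := pvMinIdx (PySem.Chars.find rest ['\r']) (PySem.Chars.find rest ['\n'])
    if j = -1 then cs.take l.toNat
    else cs.take l.toNat ++ pvGoB (rest.drop j.toNat)
termination_by cs.length
decreasing_by
  · exact pvGoBDec cs (pvFindNeNil cs h0) _ _
  · exact pvGoBDec cs (pvFindNeNil cs h0) _ _

def strip_st_comments_py_alt (text : String) : String := String.ofList (pvGoB text.toList)

-- ===== PRECONDITION & SPEC =====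
def Spec_strip_st_comments_py (text : String) (out : String) : Prop := out = strip_st_comments_py_alt text
instance (text : String) (out : String) : Decidable (Spec_strip_st_comments_py text out) := by unfold Spec_strip_st_comments_py; infer_instance

-- ===== CLAIM (what is proved, stated in full; the proofs are below) =====
def Claim_equal_strip_st_comments_py : Prop := ∀ (text : String), Dom_strip_st_comments_py text → Spec_strip_st_comments_py text (strip_st_comments_py text)

-- ===== LEMMAS AND PROOFS =====

lemma pvFind_nil (sub : List Char) (h : sub.isEmpty = false) :
    PySem.Chars.find [] sub = -1 := by
  simp [PySem.Chars.find, PySem.Chars.find.go, h]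

lemma pvGoShift (sub : List Char) (h : sub.isEmpty = false) :
    ∀ (cs : List Char) (k : Nat),
      PySem.Chars.find.go sub cs (k + 1) =
        if PySem.Chars.find.go sub cs k = -1 then -1 else PySem.Chars.find.go sub cs k + 1 := by
  intro cs
  induction cs with
  | nil => intro k; simp [PySem.Chars.find.go, h]
  | cons c t ih =>
    intro k
    simp only [PySem.Chars.find.go]
    split
    · have : ((k : Int)) ≠ -1 := by omega
      simp [this]
    · exact ih (k + 1)

lemma pvGoShift1 (sub : List Char) (h : sub.isEmpty = false) (cs : List Char) :
    PySem.Chars.find.go sub cs 1 =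
      if PySem.Chars.find cs sub = -1 then -1 else PySem.Chars.find cs sub + 1 := by
  have := pvGoShift sub h cs 0
  simpa [PySem.Chars.find] using this

lemma pvFindCons (sub : List Char) (h : sub.isEmpty = false) (c : Char) (cs : List Char) :
    PySem.Chars.find (c :: cs) sub =
      if sub.isPrefixOf (c :: cs) then 0
      else if PySem.Chars.find cs sub = -1 then -1 else PySem.Chars.find cs sub + 1 := by
  show PySem.Chars.find.go sub (c :: cs) 0 = _
  simp only [PySem.Chars.find.go, Nat.zero_add, Nat.cast_zero]
  rw [pvGoShift1 sub h cs]

lemma pvGoNonneg (sub : List Char) :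
    ∀ (cs : List Char) (k : Nat),
      PySem.Chars.find.go sub cs k = -1 ∨ (k : Int) ≤ PySem.Chars.find.go sub cs k := by
  intro cs
  induction cs with
  | nil => intro k; simp only [PySem.Chars.find.go]; split <;> simp
  | cons c t ih =>
    intro k
    simp only [PySem.Chars.find.go]
    split
    · right; exact le_refl _
    · rcases ih (k + 1) with h | h
      · left; exact h
      · right; omega

lemma pvFindNonneg (sub cs : List Char) (h : PySem.Chars.find cs sub ≠ -1) :
    0 ≤ PySem.Chars.find cs sub := by
  rcases pvGoNonneg sub cs 0 with h' | h'
  · exact absurd h' h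
  · exact_mod_cast h'

-- the block-mode scan of A finds exactly the first "*)"
lemma pvBlockA (u : List Char) :
    pvGoA true u =
      if PySem.Chars.find u ['*', ')'] = -1 then []
      else pvGoA false (u.drop ((PySem.Chars.find u ['*', ')']).toNat + 2)) := by
  induction u with
  | nil => simp [pvGoA, pvFind_nil]
  | cons c t ih =>
    rw [pvFindCons ['*', ')'] (by decide)]
    by_cases hp : (['*', ')'] : List Char).isPrefixOf (c :: t) = true
    · cases t with
      | nil => simp [List.isPrefixOf] at hp
      | cons d t' =>
        simp only [List.isPrefixOf, Bool.and_eq_true, beq_iff_eq] at hp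
        obtain ⟨rfl, h2, -⟩ := hp
        subst h2
        rw [pvGoA]
        simp [PySem.Chars.startswith, List.isPrefixOf]
    · have hp' : (['*', ')'] : List Char).isPrefixOf (c :: t) = false := Bool.eq_false_iff.mpr hp
      have hA : pvGoA true (c :: t) = pvGoA true t := by
        rw [pvGoA]; simp [PySem.Chars.startswith, hp']
      simp only [hp', Bool.false_eq_true, if_false]
      rw [hA, ih]
      by_cases hf : PySem.Chars.find t ['*', ')'] = -1
      · simp [hf]
      · have h0 : 0 ≤ PySem.Chars.find t ['*', ')'] := pvFindNonneg _ _ hf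
        have hne : PySem.Chars.find t ['*', ')'] + 1 ≠ -1 := by omega
        rw [if_neg hf, if_neg hf, if_neg hne]
        have hh : (PySem.Chars.find t ['*', ')'] + 1).toNat + 2
             = ((PySem.Chars.find t ['*', ')']).toNat + 2) + 1 := by omega
        rw [hh, List.drop_succ_cons]

-- shifting an index by one position
def pvSh (x : Int) : Int := if x = -1 then -1 else x + 1

lemma pvShCons (sub : List Char) (h : sub.isEmpty = false) (c : Char) (cs : List Char)
    (hp : sub.isPrefixOf (c :: cs) = false) :
    PySem.Chars.find (c :: cs) sub = pvSh (PySem.Chars.find cs sub) := by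
  rw [pvFindCons sub h, hp]
  rfl

lemma pvFindProp (sub cs : List Char) :
    PySem.Chars.find cs sub = -1 ∨ 0 ≤ PySem.Chars.find cs sub := by
  by_cases h : PySem.Chars.find cs sub = -1
  · exact Or.inl h
  · exact Or.inr (pvFindNonneg _ _ h)

lemma pvSh_eq_neg_one_iff (x : Int) (hx : x = -1 ∨ 0 ≤ x) : pvSh x = -1 ↔ x = -1 := by
  unfold pvSh; split_ifs <;> constructor <;> intro <;> omega

lemma pvSh_toNat (x : Int) (hx : 0 ≤ x) : (pvSh x).toNat = x.toNat + 1 := by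
  unfold pvSh; split_ifs <;> omega

lemma pvSh_of_nonneg (x : Int) (hx : 0 ≤ x) : pvSh x = x + 1 := by
  unfold pvSh; rw [if_neg (by omega)]

lemma pvMinIdx_sh (r nl : Int) (hr : r = -1 ∨ 0 ≤ r) (hn : nl = -1 ∨ 0 ≤ nl) :
    pvMinIdx (pvSh r) (pvSh nl) = pvSh (pvMinIdx r nl) := by
  rcases hr with rfl | hr <;> rcases hn with rfl | hn <;>
    simp only [pvMinIdx, pvSh, min_def] <;> split_ifs <;> omega

lemma pvMinIdx_prop (r nl : Int) (hr : r = -1 ∨ 0 ≤ r) (hn : nl = -1 ∨ 0 ≤ nl) :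
    pvMinIdx r nl = -1 ∨ 0 ≤ pvMinIdx r nl := by
  rcases hr with rfl | hr <;> rcases hn with rfl | hn <;>
    simp only [pvMinIdx, min_def] <;> split_ifs <;> omega

lemma pvMinIdx_zero_left (x : Int) (hx : x = -1 ∨ 0 ≤ x) : pvMinIdx 0 x = 0 := by
  unfold pvMinIdx
  rcases hx with rfl | hx
  · norm_num
  · rw [if_neg (by norm_num)]
    by_cases h : x = -1
    · rw [if_pos h]
    · rw [if_neg h]; exact min_eq_left hx

lemma pvMinIdx_zero_right (x : Int) (hx : x = -1 ∨ 0 ≤ x) : pvMinIdx x 0 = 0 := by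
  unfold pvMinIdx
  rcases hx with rfl | hx
  · simp
  · by_cases h : x = -1
    · rw [if_pos h]
    · rw [if_neg h, if_neg (by norm_num)]; exact min_eq_right hx

-- take/drop through one copied head character
lemma pvTakeSh (c : Char) (t : List Char) (x : Int) (hx : 0 ≤ x) :
    (c :: t).take ((pvSh x).toNat) = c :: t.take x.toNat := by
  rw [pvSh_toNat _ hx, List.take_succ_cons]

lemma pvDropSh2 (c : Char) (t : List Char) (x : Int) (hx : 0 ≤ x) :
    (c :: t).drop ((pvSh x).toNat + 2) = t.drop (x.toNat + 2) := by
  rw [pvSh_toNat _ hx, show x.toNat + 1 + 2 = (x.toNat + 2) + 1 by omega, List.drop_succ_cons]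

-- A's line-comment skip equals B's jump to the first '\r' or '\n'
lemma pvDropLine (t : List Char) :
    List.dropWhile pvNotNL t =
      if pvMinIdx (PySem.Chars.find t ['\r']) (PySem.Chars.find t ['\n']) = -1 then []
      else t.drop ((pvMinIdx (PySem.Chars.find t ['\r']) (PySem.Chars.find t ['\n'])).toNat) := by
  induction t with
  | nil => simp [pvFind_nil, pvMinIdx]
  | cons a t' ih =>
    by_cases hr : a = '\r'
    · subst hr
      have h1 : PySem.Chars.find ('\r' :: t') ['\r'] = 0 := by
        rw [pvFindCons _ (by decide)]
        simp [List.isPrefixOf]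
      rw [h1, pvMinIdx_zero_left _ (pvFindProp ['\n'] ('\r' :: t'))]
      simp [List.dropWhile, pvNotNL]
    · by_cases hn : a = '\n'
      · subst hn
        have h1 : PySem.Chars.find ('\n' :: t') ['\n'] = 0 := by
          rw [pvFindCons _ (by decide)]
          simp [List.isPrefixOf]
        rw [h1, pvMinIdx_zero_right _ (pvFindProp ['\r'] ('\n' :: t'))]
        simp [List.dropWhile, pvNotNL]
      · have hp1 : (['\r'] : List Char).isPrefixOf (a :: t') = false := by
          simp [List.isPrefixOf]; intro h; exact absurd h.symm hr
        have hp2 : (['\n'] : List Char).isPrefixOf (a :: t') = false := by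
          simp [List.isPrefixOf]; intro h; exact absurd h.symm hn
        rw [pvShCons _ (by decide) _ _ hp1, pvShCons _ (by decide) _ _ hp2,
          pvMinIdx_sh _ _ (pvFindProp _ _) (pvFindProp _ _)]
        have hna : pvNotNL a = true := by
          unfold pvNotNL
          simp [hr, hn]
        rw [List.dropWhile_cons_of_pos hna, ih]
        have hj := pvMinIdx_prop _ _ (pvFindProp ['\r'] t') (pvFindProp ['\n'] t')
        rcases hj with hj | hj
        · simp [hj, pvSh]
        · have hne : pvMinIdx (PySem.Chars.find t' ['\r']) (PySem.Chars.find t' ['\n']) ≠ -1 := by omega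
          rw [if_neg hne, if_neg (by rw [pvSh_eq_neg_one_iff _ (Or.inr hj)]; exact hne),
            pvSh_toNat _ hj, List.drop_succ_cons]

-- B copies the head character when no comment starts at it
lemma pvGoBCons (c : Char) (t : List Char)
    (h1 : (['(', '*'] : List Char).isPrefixOf (c :: t) = false)
    (h2 : (['/', '/'] : List Char).isPrefixOf (c :: t) = false) :
    pvGoB (c :: t) = c :: pvGoB t := by
  conv_lhs => rw [pvGoB]
  conv_rhs => rw [pvGoB]
  rw [pvShCons _ (by decide) _ _ h1, pvShCons _ (by decide) _ _ h2]
  rcases pvFindProp ['(', '*'] t with hb1 | hb0 <;> rcases pvFindProp ['/', '/'] t with hl1 | hl0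
  · simp [hb1, hl1, pvSh]
  · -- only "//" occurs: line branch on both sides
    have hsb : pvSh (PySem.Chars.find t ['(', '*']) = -1 := by simp [pvSh, hb1]
    have hsl := pvSh_of_nonneg _ hl0
    have hc1 : ¬ (pvSh (PySem.Chars.find t ['(', '*']) = -1 ∧
        pvSh (PySem.Chars.find t ['/', '/']) = -1) := by
      rw [hsb, hsl]; simp; omega
    have hc2 : ¬ (PySem.Chars.find t ['(', '*'] = -1 ∧
        PySem.Chars.find t ['/', '/'] = -1) := by simp [hb1]; omega
    have hc3 : ¬ (pvSh (PySem.Chars.find t ['/', '/']) = -1 ∨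
        (¬ pvSh (PySem.Chars.find t ['(', '*']) = -1 ∧
          pvSh (PySem.Chars.find t ['(', '*']) < pvSh (PySem.Chars.find t ['/', '/']))) := by
      rw [hsb, hsl]; simp; omega
    have hc4 : ¬ (PySem.Chars.find t ['/', '/'] = -1 ∨
        (¬ PySem.Chars.find t ['(', '*'] = -1 ∧
          PySem.Chars.find t ['(', '*'] < PySem.Chars.find t ['/', '/'])) := by
      simp [hb1]; omega
    rw [dif_neg hc1, dif_neg hc2, if_neg hc3, if_neg hc4,
      pvTakeSh c t _ hl0, pvDropSh2 c t _ hl0]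
    dsimp only
    split <;> simp
  · -- only "(*" occurs: block branch on both sides
    have hsl : pvSh (PySem.Chars.find t ['/', '/']) = -1 := by simp [pvSh, hl1]
    have hsb := pvSh_of_nonneg _ hb0
    have hc1 : ¬ (pvSh (PySem.Chars.find t ['(', '*']) = -1 ∧
        pvSh (PySem.Chars.find t ['/', '/']) = -1) := by
      rw [hsb]; simp; omega
    have hc2 : ¬ (PySem.Chars.find t ['(', '*'] = -1 ∧
        PySem.Chars.find t ['/', '/'] = -1) := by simp [hl1]; omega
    rw [dif_neg hc1, dif_neg hc2, if_pos (Or.inl hsl), if_pos (Or.inl hl1),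
      pvTakeSh c t _ hb0, pvDropSh2 c t _ hb0]
    dsimp only
    split <;> simp
  · -- both occur
    have hsb := pvSh_of_nonneg _ hb0
    have hsl := pvSh_of_nonneg _ hl0
    have hc1 : ¬ (pvSh (PySem.Chars.find t ['(', '*']) = -1 ∧
        pvSh (PySem.Chars.find t ['/', '/']) = -1) := by
      rw [hsb]; simp; omega
    have hc2 : ¬ (PySem.Chars.find t ['(', '*'] = -1 ∧
        PySem.Chars.find t ['/', '/'] = -1) := by simp; omega
    rw [dif_neg hc1, dif_neg hc2]
    by_cases hlt : PySem.Chars.find t ['(', '*'] < PySem.Chars.find t ['/', '/']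
    · have hc3 : pvSh (PySem.Chars.find t ['/', '/']) = -1 ∨
          (¬ pvSh (PySem.Chars.find t ['(', '*']) = -1 ∧
            pvSh (PySem.Chars.find t ['(', '*']) < pvSh (PySem.Chars.find t ['/', '/'])) := by
        rw [hsb, hsl]; right; exact ⟨by omega, by omega⟩
      rw [if_pos hc3, if_pos (Or.inr ⟨by omega, hlt⟩),
        pvTakeSh c t _ hb0, pvDropSh2 c t _ hb0]
      dsimp only
      split <;> simp
    · have hc3 : ¬ (pvSh (PySem.Chars.find t ['/', '/']) = -1 ∨
          (¬ pvSh (PySem.Chars.find t ['(', '*']) = -1 ∧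
            pvSh (PySem.Chars.find t ['(', '*']) < pvSh (PySem.Chars.find t ['/', '/']))) := by
        rw [hsb, hsl]; simp; omega
      have hc4 : ¬ (PySem.Chars.find t ['/', '/'] = -1 ∨
          (¬ PySem.Chars.find t ['(', '*'] = -1 ∧
            PySem.Chars.find t ['(', '*'] < PySem.Chars.find t ['/', '/'])) := by
        simp; omega
      rw [if_neg hc3, if_neg hc4, pvTakeSh c t _ hl0, pvDropSh2 c t _ hl0]
      dsimp only
      split <;> simp

-- main equivalence between the two loops
theorem pvMain (cs : List Char) : pvGoA false cs = pvGoB cs := by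
  match cs with
  | [] =>
    rw [pvGoB]
    simp [pvGoA, pvFind_nil]
  | c :: t =>
    by_cases hp : (['(', '*'] : List Char).isPrefixOf (c :: t) = true
    · -- a block comment starts here
      cases t with
      | nil => simp [List.isPrefixOf] at hp
      | cons d u =>
        simp only [List.isPrefixOf, Bool.and_eq_true, beq_iff_eq] at hp
        obtain ⟨rfl, h2, -⟩ := hp
        subst h2
        have hA : pvGoA false ('(' :: '*' :: u) = pvGoA true u := by
          rw [pvGoA]; simp [PySem.Chars.startswith, List.isPrefixOf]
        have hb : PySem.Chars.find ('(' :: '*' :: u) ['(', '*'] = 0 := by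
          rw [pvFindCons _ (by decide)]
          simp [List.isPrefixOf]
        have hl := pvShCons ['/', '/'] (by decide) '(' ('*' :: u) (by simp [List.isPrefixOf])
        have hl2 := pvShCons ['/', '/'] (by decide) '*' u (by simp [List.isPrefixOf])
        conv_rhs => rw [pvGoB]
        rw [hb, hl, hl2]
        rw [dif_neg (by simp)]
        rw [if_pos (by
          rcases pvFindProp ['/', '/'] u with h | h
          · left; simp [pvSh, h]
          · right
            refine ⟨by simp, ?_⟩
            rw [pvSh_of_nonneg _ h, pvSh_of_nonneg _ (by omega)]
            omega)]
        rw [show List.take ((0 : Int).toNat) ('(' :: '*' :: u) = ([] : List Char) from rfl,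
          show List.drop ((0 : Int).toNat + 2) ('(' :: '*' :: u) = u from rfl]
        rw [hA, pvBlockA]
        by_cases he : PySem.Chars.find u ['*', ')'] = -1
        · simp [he]
        · rw [if_neg he, if_neg he, List.nil_append]
          exact pvMain _
    · by_cases hq : (['/', '/'] : List Char).isPrefixOf (c :: t) = true
      · -- a line comment starts here
        cases t with
        | nil => simp [List.isPrefixOf] at hq
        | cons d u =>
          have hp0 := hp
          simp only [List.isPrefixOf, Bool.and_eq_true, beq_iff_eq] at hq
          obtain ⟨rfl, h2, -⟩ := hq
          subst h2
          have hA : pvGoA false ('/' :: '/' :: u) =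
              pvGoA false (List.dropWhile pvNotNL ('/' :: '/' :: u)) := by
            rw [pvGoA]
            simp [PySem.Chars.startswith, List.isPrefixOf, Bool.eq_false_iff.mpr hp0]
          have hl : PySem.Chars.find ('/' :: '/' :: u) ['/', '/'] = 0 := by
            rw [pvFindCons _ (by decide)]
            simp [List.isPrefixOf]
          have hb1 := pvShCons ['(', '*'] (by decide) '/' ('/' :: u) (by simp [List.isPrefixOf])
          have hb2 := pvShCons ['(', '*'] (by decide) '/' u (by simp [List.isPrefixOf])
          conv_rhs => rw [pvGoB]
          rw [hl, hb1, hb2]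
          rw [dif_neg (by simp)]
          rw [if_neg (by
            push_neg
            refine ⟨by omega, fun h3 => ?_⟩
            rcases pvFindProp ['(', '*'] u with h | h
            · simp [pvSh, h] at h3
            · rw [pvSh_of_nonneg _ h, pvSh_of_nonneg _ (by omega)]
              omega)]
          rw [show List.take ((0 : Int).toNat) ('/' :: '/' :: u) = ([] : List Char) from rfl,
            show List.drop ((0 : Int).toNat + 2) ('/' :: '/' :: u) = u from rfl]
          rw [hA]
          have hdw : List.dropWhile pvNotNL ('/' :: '/' :: u) = List.dropWhile pvNotNL u := by
            simp [List.dropWhile, pvNotNL]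
          rw [hdw, pvDropLine]
          by_cases hj : pvMinIdx (PySem.Chars.find u ['\r']) (PySem.Chars.find u ['\n']) = -1
          · simp [hj, pvGoA]
          · rw [if_neg hj, if_neg hj, List.nil_append]
            exact pvMain _
      · -- plain character: both sides copy it
        have hp' : (['(', '*'] : List Char).isPrefixOf (c :: t) = false := Bool.eq_false_iff.mpr hp
        have hq' : (['/', '/'] : List Char).isPrefixOf (c :: t) = false := Bool.eq_false_iff.mpr hq
        have hA : pvGoA false (c :: t) = c :: pvGoA false t := by
          rw [pvGoA]
          simp [PySem.Chars.startswith, hp', hq']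
        rw [hA, pvGoBCons c t hp' hq', pvMain t]
termination_by cs.length
decreasing_by
  all_goals simp only [List.length_drop, List.length_cons]
  all_goals omega

-- ===== VERDICT (by name: the statement is the Claim_ definition above) =====
theorem strip_st_comments_py_spec : Claim_equal_strip_st_comments_py := by
  intro text _
  unfold Spec_strip_st_comments_py strip_st_comments_py strip_st_comments_py_alt
  rw [pvMain]
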